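-- pv_equiv track=rewrite | github.com/jonkiparsky/adventofcode | 2015/day19.py | transform_mol
-- ===== SOURCE A (Python) =====
-- def transform_mol(molecule, element, replacements):
--     match replacements:
--         case []:
--             return []
--         case [first, *rest]:
--             return transform_mol(molecule, element, first).union(
--                 transform_mol(molecule, element, rest))
--         case replacement:
--             return replace_each(molecule, element, replacement)
--
-- def replace_each(molecule, element, replacement):
--
--     accumulator = set()
--     ix = molecule.find(element)
--     while ix > -1:
--         prefix, tail = molecule[:ix], molecule[ix:]
--         accumulator.add(prefix + tail.replace(element, replacement, 1))
--         ix = tail[len(element):].find(element)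
--         if ix > -1:
--             ix += ( len(prefix) + len(element))
--     return accumulator
-- ===== SOURCE B (Python) =====
-- def transform_mol(molecule, element, replacements):
--     if not replacements:
--         return []
--     parts = molecule.split(element)
--     out = set()
--     for replacement in replacements:
--         for i in range(1, len(parts)):
--             out.add(element.join(parts[:i]) + replacement + element.join(parts[i:]))
--     return out
-- ===== Notes on version B (the rewrite author's own statement) =====
-- stated objective: faster
-- what changed: B replaces A's recursive set-union over replacements and the stateful find/advance index scan of replace_each by one split of the molecule on the element and, per replacement, a direct reconstruction element.join(parts[:i]) + replacement + element.join(parts[i:]) for each boundary i.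
import Mathlib
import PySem

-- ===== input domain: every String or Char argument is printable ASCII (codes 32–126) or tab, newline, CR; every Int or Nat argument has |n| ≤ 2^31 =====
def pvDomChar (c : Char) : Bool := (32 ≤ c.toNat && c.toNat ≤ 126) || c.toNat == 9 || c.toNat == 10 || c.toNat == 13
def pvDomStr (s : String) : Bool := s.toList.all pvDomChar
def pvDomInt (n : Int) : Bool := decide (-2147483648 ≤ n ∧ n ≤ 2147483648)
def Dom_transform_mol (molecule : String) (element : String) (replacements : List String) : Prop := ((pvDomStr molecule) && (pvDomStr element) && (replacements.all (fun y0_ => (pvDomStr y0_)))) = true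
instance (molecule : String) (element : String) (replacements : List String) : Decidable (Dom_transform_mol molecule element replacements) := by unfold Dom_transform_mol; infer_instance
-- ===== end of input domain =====

-- B rebuilds each result from molecule.split(element) with element.join(parts[:i]) + replacement + element.join(parts[i:])
-- instead of A's recursive set-union plus find/advance index scan; same return value (objective: simpler decomposition).

-- ===== PORT A =====
-- exact port of Python's tail.replace(element, replacement, 1) (count = 1) on code points
def pyReplaceOne (old new : List Char) : List Char → List Char
  | [] => if old.isPrefixOf ([] : List Char) then new ++ List.drop old.length [] else []
  | c :: t =>
    if old.isPrefixOf (c :: t) then new ++ List.drop old.length (c :: t)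
    else c :: pyReplaceOne old new t

-- the while-loop of replace_each; fuel molecule.length + 1 suffices whenever element ≠ "" ,
-- because ix strictly increases by at least len(element) ≥ 1 each iteration
def replaceEachLoop (molecule element replacement : List Char) : Nat → PySem.Set String → Int → PySem.Set String
  | 0, acc, _ => acc
  | fuel + 1, acc, ix =>
    if ix > -1 then
      let pre := PySem.Chars.slice molecule none (some ix)
      let tail := PySem.Chars.slice molecule (some ix) none
      let acc' := PySem.Set.add acc (String.mk (pre ++ pyReplaceOne element replacement tail))
      let ix1 := PySem.Chars.find (PySem.Chars.slice tail (some (element.length : Int)) none) element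
      let ix2 := if ix1 > -1 then ix1 + (pre.length : Int) + (element.length : Int) else ix1
      replaceEachLoop molecule element replacement fuel acc' ix2
    else acc

def replace_each (molecule element replacement : String) : List String :=
  replaceEachLoop molecule.toList element.toList replacement.toList
    (molecule.toList.length + 1) [] (PySem.Chars.find molecule.toList element.toList)

-- Python's `case [first, *rest]` recursion; the recursive call on the string `first`
-- falls through to `case replacement` and is the replace_each call (replacements : List String here)
def transform_mol (molecule : String) (element : String) (replacements : List String) : List String :=
  match replacements with
  | [] => []
  | first :: rest =>
    PySem.Set.union (replace_each molecule element first) (transform_mol molecule element rest)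

-- ===== PORT B =====
def transform_mol_alt (molecule : String) (element : String) (replacements : List String) : List String :=
  match replacements with
  | [] => []
  | _ :: _ =>
    let parts := PySem.Chars.splitOn molecule.toList element.toList
    replacements.foldl (fun out replacement =>
      (PySem.List.pyRange 1 (parts.length : Int)).foldl (fun out i =>
        PySem.Set.add out (String.mk
          (PySem.Chars.join element.toList (PySem.List.slice parts none (some i)) ++
            replacement.toList ++
            PySem.Chars.join element.toList (PySem.List.slice parts (some i) none)))) out) []

-- ===== PRECONDITION & SPEC =====
-- Pre_ excludes element = "" with nonempty replacements: there Python A loops forever in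
-- replace_each (molecule.find('') is always 0) and B's molecule.split('') raises ValueError.
def Pre_transform_mol (molecule : String) (element : String) (replacements : List String) : Prop :=
  element ≠ "" ∨ replacements = []
instance (molecule : String) (element : String) (replacements : List String) : Decidable (Pre_transform_mol molecule element replacements) := by unfold Pre_transform_mol; infer_instance

def pvWitness_transform_mol : String × String × List String := ("HOH", "H", ["O", "N"])

def Spec_transform_mol (molecule : String) (element : String) (replacements : List String) (out : List String) : Prop := out = transform_mol_alt molecule element replacements
instance (molecule : String) (element : String) (replacements : List String) (out : List String) : Decidable (Spec_transform_mol molecule element replacements out) := by unfold Spec_transform_mol; infer_instance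

-- ===== CLAIM (what is proved, stated in full; the proofs are below) =====
def Claim_equal_transform_mol : Prop := ∀ (molecule : String) (element : String) (replacements : List String), Dom_transform_mol molecule element replacements → Pre_transform_mol molecule element replacements → Spec_transform_mol molecule element replacements (transform_mol molecule element replacements)

-- ===== LEMMAS AND PROOFS =====

-- first-occurrence characterisation of find
lemma find_eq_of {e s : List Char} {n : Nat} (h1 : e <+: s.drop n)
    (h2 : ∀ i < n, ¬ e <+: s.drop i) : PySem.Chars.find s e = (n : Int) := by
  have hin : PySem.Chars.isIn e s = true :=
    (PySem.Chars.exists_prefix_drop_iff_isIn e s).mp ⟨n, h1⟩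
  have h0 : 0 ≤ PySem.Chars.find s e :=
    (PySem.Chars.find_nonneg_iff s e).mpr ((PySem.Chars.isIn_iff_infix e s).mp hin)
  obtain ⟨hp, hmin⟩ := PySem.Chars.find_spec h0
  have hFn : (PySem.Chars.find s e).toNat = n := by
    rcases Nat.lt_trichotomy (PySem.Chars.find s e).toNat n with h | h | h
    · exact absurd hp (h2 _ h)
    · exact h
    · exact absurd h1 (hmin n h)
  omega

-- decomposition of a string at an occurrence
lemma occ_decomp {e m : List Char} {j : Nat} (h : e <+: m.drop j) :
    m = m.take j ++ e ++ m.drop (j + e.length) := by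
  obtain ⟨t, ht⟩ := h
  have hdt : m.drop (j + e.length) = t := by
    rw [← List.drop_drop, ← ht, List.drop_left]
  rw [hdt]
  conv_lhs => rw [← List.take_append_drop j m]
  rw [← ht, List.append_assoc]

-- the non-overlapping left-to-right split of m on e (e ≠ "")
def splitRef (e : List Char) (he : e ≠ []) (m : List Char) : List (List Char) :=
  if h : PySem.Chars.find m e = -1 then [m]
  else
    m.take (PySem.Chars.find m e).toNat ::
      splitRef e he (m.drop ((PySem.Chars.find m e).toNat + e.length))
termination_by m.length
decreasing_by
  have h0 : 0 ≤ PySem.Chars.find m e := by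
    have := PySem.Chars.neg_one_le_find m e; omega
  have hinf : e <:+: m := (PySem.Chars.find_nonneg_iff m e).mp h0
  have hm : m ≠ [] := by
    rintro rfl
    exact he (List.eq_nil_of_infix_nil hinf)
  have he' : 0 < e.length := List.length_pos_iff.mpr he
  have hm' : 0 < m.length := List.length_pos_iff.mpr hm
  simp only [List.length_drop]
  omega

lemma splitRef_ne_nil (e : List Char) (he : e ≠ []) (m : List Char) :
    splitRef e he m ≠ [] := by
  rw [splitRef]; split <;> simp

lemma splitRef_eq (e : List Char) (he : e ≠ []) (m : List Char) :
    splitRef e he m =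
      if h : PySem.Chars.find m e = -1 then [m]
      else
        m.take (PySem.Chars.find m e).toNat ::
          splitRef e he (m.drop ((PySem.Chars.find m e).toNat + e.length)) := by
  rw [splitRef]

lemma join_splitRef (e : List Char) (he : e ≠ []) (m : List Char) :
    PySem.Chars.join e (splitRef e he m) = m := by
  induction m using splitRef.induct e he with
  | case1 m h => rw [splitRef, dif_pos h, PySem.Chars.join_singleton]
  | case2 m h IH =>
    rw [splitRef, dif_neg h]
    have h0 : 0 ≤ PySem.Chars.find m e := by
      have := PySem.Chars.neg_one_le_find m e; omega
    obtain ⟨hp, -⟩ := PySem.Chars.find_spec h0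
    obtain ⟨q, qs, hq⟩ := List.exists_cons_of_ne_nil
      (splitRef_ne_nil e he (m.drop ((PySem.Chars.find m e).toNat + e.length)))
    rw [hq] at IH ⊢
    rw [PySem.Chars.join_cons_cons, IH]
    exact (occ_decomp hp).symm

def consHead (p : List Char) : List (List Char) → List (List Char)
  | [] => [p]
  | x :: xs => (p ++ x) :: xs

lemma consHead_consHead (p q : List Char) (X : List (List Char)) :
    consHead p (consHead q X) = consHead (p ++ q) X := by
  cases X <;> simp [consHead]

lemma find_cons {e : List Char} (c : Char) (t : List Char)
    (hnp : ¬ e.isPrefixOf (c :: t) = true) :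
    PySem.Chars.find (c :: t) e =
      if PySem.Chars.find t e = -1 then -1 else PySem.Chars.find t e + 1 := by
  rw [List.isPrefixOf_iff_prefix] at hnp
  by_cases ht : PySem.Chars.find t e = -1
  · rw [if_pos ht, PySem.Chars.find_eq_neg_one_iff]
    rw [PySem.Chars.find_eq_neg_one_iff] at ht
    intro hinf
    rcases List.infix_cons_iff.mp hinf with hpre | hinf'
    · exact hnp hpre
    · exact ht hinf'
  · have h0 : 0 ≤ PySem.Chars.find t e := by
      have := PySem.Chars.neg_one_le_find t e; omega
    obtain ⟨hp, hmin⟩ := PySem.Chars.find_spec h0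
    have : PySem.Chars.find (c :: t) e = ((PySem.Chars.find t e).toNat + 1 : Nat) := by
      apply find_eq_of
      · simpa using hp
      · rintro (_ | i) hi
        · simpa using hnp
        · simpa using hmin i (by omega)
    rw [if_neg ht, this]
    omega

lemma splitRef_cons_not_prefix (e : List Char) (he : e ≠ []) (c : Char) (t : List Char)
    (hnp : ¬ e.isPrefixOf (c :: t) = true) :
    splitRef e he (c :: t) = consHead [c] (splitRef e he t) := by
  by_cases ht : PySem.Chars.find t e = -1
  · have hct : PySem.Chars.find (c :: t) e = -1 := by rw [find_cons c t hnp, if_pos ht]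
    rw [splitRef_eq e he (c :: t), dif_pos hct, splitRef_eq e he t, dif_pos ht]
    simp [consHead]
  · have h0 : 0 ≤ PySem.Chars.find t e := by
      have := PySem.Chars.neg_one_le_find t e; omega
    have hct : PySem.Chars.find (c :: t) e = PySem.Chars.find t e + 1 := by
      rw [find_cons c t hnp, if_neg ht]
    have hct' : PySem.Chars.find (c :: t) e ≠ -1 := by omega
    rw [splitRef_eq e he (c :: t), dif_neg hct', splitRef_eq e he t, dif_neg ht]
    have htn : (PySem.Chars.find (c :: t) e).toNat = (PySem.Chars.find t e).toNat + 1 := by omega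
    rw [htn]
    simp [consHead, List.take_succ_cons, List.drop_succ_cons, Nat.add_right_comm]

lemma splitOn_go_eq (e : List Char) (he : e ≠ []) :
    ∀ (fuel : Nat) (l cur : List Char) (acc : List (List Char)), l.length < fuel →
      PySem.Chars.splitOn.go e fuel l cur acc =
        acc.reverse ++ consHead cur.reverse (splitRef e he l) := by
  intro fuel
  induction fuel with
  | zero => intro l cur acc h; omega
  | succ fuel IH =>
    intro l cur acc hlen
    cases l with
    | nil =>
      rw [PySem.Chars.splitOn.go.eq_def]
      have hnil : splitRef e he [] = [[]] := by
        rw [splitRef, dif_pos]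
        rw [PySem.Chars.find_eq_neg_one_iff]
        intro hinf
        exact he (List.eq_nil_of_infix_nil hinf)
      simp [hnil, consHead]
    | cons c t =>
      rw [PySem.Chars.splitOn.go.eq_def]
      by_cases hp : e.isPrefixOf (c :: t) = true
      · simp only [hp, if_true]
        have hple : 0 < e.length := List.length_pos_iff.mpr he
        have hlen' : (List.drop e.length (c :: t)).length < fuel := by
          simp only [List.length_drop, List.length_cons] at *
          omega
        rw [IH _ _ _ hlen']
        have hf0 : PySem.Chars.find (c :: t) e = ((0 : Nat) : Int) :=
          find_eq_of (by simpa [List.isPrefixOf_iff_prefix] using hp) (by omega)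
        have hf0' : PySem.Chars.find (c :: t) e ≠ -1 := by rw [hf0]; decide
        rw [splitRef_eq e he (c :: t), dif_neg hf0', hf0]
        obtain ⟨q, qs, hq⟩ := List.exists_cons_of_ne_nil
          (splitRef_ne_nil e he (List.drop ((0 : Int).toNat + e.length) (c :: t)))
        simp only [Int.toNat_zero, Nat.zero_add] at hq ⊢
        rw [hq]
        simp [consHead, hq]
      · simp only [hp, if_false]
        have hlen' : t.length < fuel := by
          simp only [List.length_cons] at hlen; omega
        rw [IH _ _ _ hlen']
        rw [splitRef_cons_not_prefix e he c t (by simpa using hp)]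
        rw [consHead_consHead]
        simp

lemma splitOn_eq (e : List Char) (he : e ≠ []) (m : List Char) :
    PySem.Chars.splitOn m e = splitRef e he m := by
  unfold PySem.Chars.splitOn
  rw [splitOn_go_eq e he _ _ _ _ (by omega)]
  obtain ⟨q, qs, hq⟩ := List.exists_cons_of_ne_nil (splitRef_ne_nil e he m)
  rw [hq]
  simp [consHead]

lemma pyReplaceOne_of_prefix {old : List Char} (new : List Char) {s : List Char}
    (h : old <+: s) : pyReplaceOne old new s = new ++ s.drop old.length := by
  cases s with
  | nil => rw [pyReplaceOne, if_pos (List.isPrefixOf_iff_prefix.mpr h)]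
  | cons c t => rw [pyReplaceOne, if_pos (List.isPrefixOf_iff_prefix.mpr h)]

-- the boundary-i reconstruction list that B builds, in scan order
def candsRef (e r : List Char) : List Char → List (List Char) → List (List Char)
  | _, [] => []
  | _, [_] => []
  | p, q :: y :: ys =>
    (p ++ q ++ r ++ PySem.Chars.join e (y :: ys)) :: candsRef e r (p ++ q ++ e) (y :: ys)

-- A's while-loop produces exactly the candsRef list, folded into the accumulator
lemma loop_eq (e r : List Char) (he : e ≠ []) :
    ∀ (fuel : Nat) (p s : List Char) (acc : PySem.Set String), s.length < fuel →
      replaceEachLoop (p ++ s) e r fuel acc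
          (if PySem.Chars.find s e = -1 then -1 else (p.length : Int) + PySem.Chars.find s e) =
        List.foldl PySem.Set.add acc ((candsRef e r p (splitRef e he s)).map String.mk) := by
  intro fuel
  induction fuel with
  | zero => intro p s acc h; omega
  | succ fuel IH =>
    intro p s acc hlen
    by_cases hf : PySem.Chars.find s e = -1
    · rw [if_pos hf, splitRef, dif_pos hf]
      rw [replaceEachLoop, if_neg (by decide)]
      rfl
    · have h0 : 0 ≤ PySem.Chars.find s e := by
        have := PySem.Chars.neg_one_le_find s e; omega
      obtain ⟨hp, hmin⟩ := PySem.Chars.find_spec h0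
      set j := (PySem.Chars.find s e).toNat with hj
      have hjf : PySem.Chars.find s e = (j : Int) := by omega
      have hjlen : j ≤ s.length := by
        have := PySem.Chars.find_le_length s e; omega
      have hel : 0 < e.length := List.length_pos_iff.mpr he
      have hsub : j + e.length ≤ s.length := by
        have := hp.length_le
        simp only [List.length_drop] at this
        omega
      rw [if_neg hf, replaceEachLoop, if_pos (by omega : ((p.length : Int) + PySem.Chars.find s e) > -1)]
      simp only [hjf]
      have hcast : ((p.length : Int) + (j : Int)) = ((p.length + j : Nat) : Int) := by push_cast; ring
      have hpre1 : PySem.Chars.slice (p ++ s) none (some ((p.length : Int) + (j : Int))) =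
          p ++ s.take j := by
        rw [PySem.Chars.slice_eq_listSlice, hcast, PySem.List.slice_to_natCast, List.take_append,
          List.take_of_length_le (Nat.le_add_right _ _)]
        simp
      have htail : PySem.Chars.slice (p ++ s) (some ((p.length : Int) + (j : Int))) none =
          s.drop j := by
        rw [PySem.Chars.slice_eq_listSlice, hcast, PySem.List.slice_from_natCast, List.drop_append,
          List.drop_eq_nil_of_le (Nat.le_add_right _ _)]
        simp
      have hs2 : PySem.Chars.slice (s.drop j) (some ((e.length : Nat) : Int)) none =
          s.drop (j + e.length) := by
        rw [PySem.Chars.slice_eq_listSlice, PySem.List.slice_from_natCast, List.drop_drop]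
      have hrepl : pyReplaceOne e r (s.drop j) = r ++ s.drop (j + e.length) := by
        rw [pyReplaceOne_of_prefix r hp, List.drop_drop]
      have hprelen : (p ++ s.take j).length = p.length + j := by
        simp [Nat.min_eq_left hjlen]
      have hp2len : ((p ++ s.take j) ++ e).length = p.length + j + e.length := by
        simp [Nat.min_eq_left hjlen]
        omega
      have hnegle := PySem.Chars.neg_one_le_find (s.drop (j + e.length)) e
      have hix : (if PySem.Chars.find (s.drop (j + e.length)) e > -1 then
            PySem.Chars.find (s.drop (j + e.length)) e + ((p.length + j : Nat) : Int) + (e.length : Int)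
          else PySem.Chars.find (s.drop (j + e.length)) e) =
          (if PySem.Chars.find (s.drop (j + e.length)) e = -1 then -1
           else (((p ++ s.take j) ++ e).length : Int) + PySem.Chars.find (s.drop (j + e.length)) e) := by
        by_cases h2 : PySem.Chars.find (s.drop (j + e.length)) e = -1
        · rw [if_neg (by omega), if_pos h2, h2]
        · rw [if_pos (by omega), if_neg h2, hp2len]
          push_cast
          ring
      have happ : ((p ++ s.take j) ++ e) ++ s.drop (j + e.length) = p ++ s := by
        conv_rhs => rw [occ_decomp hp]
        simp [List.append_assoc]
      have fuel2 : (s.drop (j + e.length)).length < fuel := by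
        simp only [List.length_drop]
        omega
      rw [hpre1, htail, hs2, hrepl, hprelen, hix, ← happ]
      rw [IH ((p ++ s.take j) ++ e) (s.drop (j + e.length)) _ fuel2]
      rw [splitRef_eq e he s, dif_neg hf, hjf, Int.toNat_natCast]
      obtain ⟨q, qs, hq⟩ := List.exists_cons_of_ne_nil (splitRef_ne_nil e he (s.drop (j + e.length)))
      rw [hq, candsRef, ← hq, join_splitRef]
      simp only [List.map_cons, List.foldl_cons]
      simp [List.append_assoc]

-- replace_each in terms of candsRef
lemma replace_each_eq (molecule element r : String) (he : element.toList ≠ []) :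
    replace_each molecule element r =
      List.foldl PySem.Set.add []
        ((candsRef element.toList r.toList []
          (splitRef element.toList he molecule.toList)).map String.mk) := by
  unfold replace_each
  have hix : PySem.Chars.find molecule.toList element.toList =
      (if PySem.Chars.find molecule.toList element.toList = -1 then -1
       else ((([] : List Char).length : Int)) + PySem.Chars.find molecule.toList element.toList) := by
    by_cases h : PySem.Chars.find molecule.toList element.toList = -1 <;> simp [h]
  rw [hix]
  exact loop_eq element.toList r.toList he _ [] molecule.toList [] (by omega)

-- folding a set into a set, element by element
lemma foldl_add_add (s t : PySem.Set String) (a : String) :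
    List.foldl PySem.Set.add s (PySem.Set.add t a) =
      PySem.Set.add (List.foldl PySem.Set.add s t) a := by
  have hup : List.foldl PySem.Set.add s t = PySem.Set.update s t := rfl
  by_cases h : PySem.Set.contains t a = true
  · have ha : a ∈ t := (PySem.Set.contains_iff t a).mp h
    have ha' : a ∈ List.foldl PySem.Set.add s t := by
      rw [hup]; exact (PySem.Set.mem_update s t a).mpr (Or.inr ha)
    rw [show PySem.Set.add t a = t from by simp [PySem.Set.add, h, ha]]
    rw [show PySem.Set.add (List.foldl PySem.Set.add s t) a = List.foldl PySem.Set.add s t from by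
      simp [PySem.Set.add, (PySem.Set.contains_iff _ a).mpr ha', ha']]
  · have ha2 : a ∉ t := fun hm => h ((PySem.Set.contains_iff t a).mpr hm)
    rw [show PySem.Set.add t a = t ++ [a] from by simp [PySem.Set.add, h, ha2]]
    rw [List.foldl_append]
    rfl

lemma foldl_add_foldl (L : List String) : ∀ (s t : PySem.Set String),
    List.foldl PySem.Set.add s (List.foldl PySem.Set.add t L) =
      List.foldl PySem.Set.add (List.foldl PySem.Set.add s t) L := by
  induction L with
  | nil => intro s t; rfl
  | cons a L IH =>
    intro s t
    simp only [List.foldl_cons]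
    rw [IH, foldl_add_add]

-- A's recursion over the replacement list, folded into any start set
lemma A_fold (molecule element : String) (he : element.toList ≠ []) :
    ∀ (rs : List String) (S : PySem.Set String),
      List.foldl PySem.Set.add S (transform_mol molecule element rs) =
        List.foldl (fun out r => List.foldl PySem.Set.add out
          ((candsRef element.toList r.toList []
            (splitRef element.toList he molecule.toList)).map String.mk)) S rs := by
  intro rs
  induction rs with
  | nil => intro S; rfl
  | cons r rs IH =>
    intro S
    show List.foldl PySem.Set.add S
        (PySem.Set.union (replace_each molecule element r) (transform_mol molecule element rs)) = _
    have hu : PySem.Set.union (replace_each molecule element r) (transform_mol molecule element rs) =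
        List.foldl PySem.Set.add (replace_each molecule element r)
          (transform_mol molecule element rs) := rfl
    rw [hu, foldl_add_foldl, replace_each_eq molecule element r he, foldl_add_foldl]
    rw [List.foldl_cons, IH]
    rfl

lemma loop_nodup (m e r : List Char) :
    ∀ (fuel : Nat) (acc : PySem.Set String) (ix : Int), acc.Nodup →
      (replaceEachLoop m e r fuel acc ix).Nodup := by
  intro fuel
  induction fuel with
  | zero => intro acc ix h; exact h
  | succ fuel IH =>
    intro acc ix h
    rw [replaceEachLoop]
    split
    · exact IH _ _ (PySem.Set.nodup_add _ _ h)
    · exact h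

lemma A_nodup (molecule element : String) (rs : List String) :
    (transform_mol molecule element rs).Nodup := by
  induction rs with
  | nil => exact List.nodup_nil
  | cons r rs IH =>
    exact PySem.Set.nodup_union _ _ (loop_nodup _ _ _ _ _ _ List.nodup_nil)

lemma foldl_add_nil (s : PySem.Set String) (h : s.Nodup) :
    List.foldl PySem.Set.add [] s = s := by
  have : List.foldl PySem.Set.add ([] : PySem.Set String) s = PySem.Set.update [] s := rfl
  rw [this, PySem.Set.update_eq_append_of_disjoint _ _ h (by simp), List.nil_append]

lemma pyRange_nil {a b : Int} (h : b ≤ a) : PySem.List.pyRange a b = [] := by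
  apply List.eq_nil_iff_forall_not_mem.mpr
  intro x hx
  rw [PySem.List.mem_pyRange_one] at hx
  omega

lemma pyRange_one_natCast (n : Nat) :
    PySem.List.pyRange 1 (n : Int) = (List.range' 1 (n - 1)).map (fun k : Nat => (k : Int)) := by
  cases n with
  | zero => simp [pyRange_nil]
  | succ n =>
    have hsplit : PySem.List.pyRange 0 ((n + 1 : Nat) : Int) =
        PySem.List.pyRange 0 1 ++ PySem.List.pyRange 1 ((n + 1 : Nat) : Int) :=
      PySem.List.pyRange_one_append 0 1 _ (by omega) (by push_cast; omega)
    have h01 : PySem.List.pyRange 0 1 = [0] := by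
      rw [PySem.List.pyRange_one_cons (by omega), pyRange_nil (by omega)]
    have hzero := PySem.List.pyRange_zero_natCast (n + 1)
    rw [h01, hzero] at hsplit
    have hr : List.range (n + 1) = 0 :: List.range' 1 n := by
      rw [List.range_eq_range', List.range'_succ]
    rw [hr] at hsplit
    simp only [List.map_cons, List.cons_append, List.nil_append, Nat.cast_zero] at hsplit
    simp only [Nat.add_sub_cancel]
    injection hsplit with h1 h2
    exact h2.symm

-- B's boundary list equals candsRef
lemma mapeq (e r : List Char) : ∀ (parts : List (List Char)) (p : List Char),
    (List.range' 1 (parts.length - 1)).map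
      (fun k => p ++ PySem.Chars.join e (parts.take k) ++ r ++ PySem.Chars.join e (parts.drop k)) =
      candsRef e r p parts := by
  intro parts
  induction parts with
  | nil => intro p; rfl
  | cons q rest IH =>
    intro p
    cases rest with
    | nil => rfl
    | cons y ys =>
      rw [candsRef]
      have hlen : (q :: y :: ys).length - 1 = ys.length + 1 := by simp
      rw [hlen, List.range'_succ, List.map_cons]
      congr 1
      · simp [PySem.Chars.join_singleton]
      · rw [← IH (p ++ q ++ e)]
        have hlen2 : (y :: ys).length - 1 = ys.length := by simp
        rw [hlen2]
        rw [List.range'_eq_map_range (s := 2), List.range'_eq_map_range (s := 1)]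
        rw [List.map_map, List.map_map]
        apply List.map_congr_left
        intro x hx
        cases ys with
        | nil => exact absurd hx (by simp)
        | cons z zs =>
          have h2 : 2 + x = (x + 1) + 1 := by omega
          have h1 : 1 + x = x + 1 := by omega
          simp only [Function.comp_apply, h2, h1, List.take_succ_cons, List.drop_succ_cons]
          rw [PySem.Chars.join_cons_cons]
          simp [List.append_assoc]

-- B's inner fold over pyRange, in candsRef form
lemma alt_inner_eq (molecule element r : String) (he : element.toList ≠ []) (out : PySem.Set String) :
    (PySem.List.pyRange 1 ((PySem.Chars.splitOn molecule.toList element.toList).length : Int)).foldl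
        (fun out i => PySem.Set.add out (String.mk
          (PySem.Chars.join element.toList
              (PySem.List.slice (PySem.Chars.splitOn molecule.toList element.toList) none (some i)) ++
            r.toList ++
            PySem.Chars.join element.toList
              (PySem.List.slice (PySem.Chars.splitOn molecule.toList element.toList) (some i) none)))) out =
      List.foldl PySem.Set.add out
        ((candsRef element.toList r.toList []
          (splitRef element.toList he molecule.toList)).map String.mk) := by
  rw [splitOn_eq element.toList he]
  rw [pyRange_one_natCast, List.foldl_map]
  rw [← mapeq element.toList r.toList (splitRef element.toList he molecule.toList) []]
  rw [List.map_map, List.foldl_map]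
  apply List.foldl_ext
  intro out' k _
  simp only [Function.comp_apply, List.nil_append]
  rw [PySem.List.slice_to _ (Int.natCast_nonneg k), PySem.List.slice_from _ (Int.natCast_nonneg k),
    Int.toNat_natCast]

-- B's outer fold over the replacement list, in candsRef form
lemma alt_eq_fold (molecule element : String) (he : element.toList ≠ []) (r : String) (rs : List String) :
    transform_mol_alt molecule element (r :: rs) =
      List.foldl (fun out r' => List.foldl PySem.Set.add out
        ((candsRef element.toList r'.toList []
          (splitRef element.toList he molecule.toList)).map String.mk)) [] (r :: rs) := by
  simp only [transform_mol_alt]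
  apply List.foldl_ext
  intro out r' _
  exact alt_inner_eq molecule element r' he out

-- ===== VERDICT (by name: the statement is the Claim_ definition above) =====
theorem transform_mol_spec : Claim_equal_transform_mol := by
  unfold Claim_equal_transform_mol
  intro molecule element replacements hdom hpre
  unfold Spec_transform_mol
  cases replacements with
  | nil => rfl
  | cons r rs =>
    have hne : element ≠ "" := by
      rcases hpre with h | h
      · exact h
      · simp at h
    have he : element.toList ≠ [] := fun hh => hne (String.toList_eq_nil_iff.mp hh)
    have hchain := A_fold molecule element he (r :: rs) []
    rw [foldl_add_nil _ (A_nodup molecule element (r :: rs))] at hchain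
    rw [hchain, alt_eq_fold molecule element he r rs]
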